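-- pv_equiv track=rewrite | github.com/GitMonsters/octotetrahedral-agi | arc-puzzle-catalog/solves/1d8b499f/solver.py | transform
-- ===== SOURCE A (Python) =====
-- from collections import Counter
--
-- def transform(grid):
--     H = len(grid)
--     W = len(grid[0])
--
--     flat = [c for row in grid for c in row]
--     cc = Counter(flat)
--     bg = cc.most_common(1)[0][0]
--
--     # Find most common non-bg color
--     non_bg_colors = [(c, cnt) for c, cnt in cc.items() if c != bg]
--     if not non_bg_colors:
--         return [[bg]*3 for _ in range(3)]
--
--     main_color = max(non_bg_colors, key=lambda x: x[1])[0]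
--
--     # Count connected components of main color (4-connected)
--     main_cells = set((r,c) for r in range(H) for c in range(W) if grid[r][c] == main_color)
--     visited = set()
--     N = 0
--     for r,c in sorted(main_cells):
--         if (r,c) in visited:
--             continue
--         N += 1
--         stack = [(r,c)]
--         while stack:
--             cr, cc_ = stack.pop()
--             if (cr, cc_) in visited or (cr, cc_) not in main_cells:
--                 continue
--             visited.add((cr, cc_))
--             for dr, dc in [(-1,0),(1,0),(0,-1),(0,1)]:
--                 stack.append((cr+dr, cc_+dc))
--
--     # The answer color is always 2
--     answer = 2
--
--     # Fixed position pattern based on count N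
--     # Positions are filled in this order:
--     # (2,2), (0,2), (1,1), (2,0), (0,0), (1,2), (2,1), (0,1), (1,0)
--     fill_order = [(2,2),(0,2),(1,1),(2,0),(0,0),(1,2),(2,1),(0,1),(1,0)]
--
--     result = [[bg]*3 for _ in range(3)]
--     for idx in range(min(N, 5)):
--         r, c = fill_order[idx]
--         result[r][c] = answer
--
--     return result
-- ===== SOURCE B (Python) =====
-- def transform(grid):
--     H = len(grid)
--     W = len(grid[0])
--
--     # frequency table in first-occurrence order (no Counter import needed)
--     counts = {}
--     for row in grid:
--         for v in row:
--             counts[v] = counts.get(v, 0) + 1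
--
--     items = list(counts.items())
--     # background = first colour attaining the maximal count
--     bg, bgn = items[0]
--     for v, n in items[1:]:
--         if n > bgn:
--             bg, bgn = v, n
--
--     # main colour = first non-bg colour attaining the maximal count
--     main_color, mn = bg, -1
--     for v, n in items:
--         if v != bg and n > mn:
--             main_color, mn = v, n
--     if mn < 0:  # no non-bg colour at all
--         return [[bg] * 3 for _ in range(3)]
--
--     # single row-major scan; merge the components touched by each cell's
--     # left/up neighbours (scanline connected-component labelling)
--     comps = []  # list of disjoint sets, the components of the cells seen so far
--     for r in range(H):
--         for c in range(W):
--             if grid[r][c] != main_color: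
--                 continue
--             touching = [comp for comp in comps if (r, c - 1) in comp or (r - 1, c) in comp]
--             rest = [comp for comp in comps if (r, c - 1) not in comp and (r - 1, c) not in comp]
--             cur = {(r, c)}
--             for comp in touching:
--                 cur |= comp
--             comps = rest + [cur]
--
--     k = min(len(comps), 5)
--     order = [(2, 2), (0, 2), (1, 1), (2, 0), (0, 0), (1, 2), (2, 1), (0, 1), (1, 0)]
--     filled = set(order[:k])
--     return [[2 if (r, c) in filled else bg for c in range(3)] for r in range(3)]
-- ===== Notes on version B (the rewrite author's own statement) =====
-- stated objective: alternative
-- what changed: The connected-component count is computed by a single row-major scanline pass that merges component sets on left/up adjacency instead of A's sort-the-cells-then-DFS-with-explicit-stack, and the colour counts / argmax selections and the 3x3 output are built by explicit folds and a membership comprehension instead of Counter.most_common/max and an index-assignment loop.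
import Mathlib
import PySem

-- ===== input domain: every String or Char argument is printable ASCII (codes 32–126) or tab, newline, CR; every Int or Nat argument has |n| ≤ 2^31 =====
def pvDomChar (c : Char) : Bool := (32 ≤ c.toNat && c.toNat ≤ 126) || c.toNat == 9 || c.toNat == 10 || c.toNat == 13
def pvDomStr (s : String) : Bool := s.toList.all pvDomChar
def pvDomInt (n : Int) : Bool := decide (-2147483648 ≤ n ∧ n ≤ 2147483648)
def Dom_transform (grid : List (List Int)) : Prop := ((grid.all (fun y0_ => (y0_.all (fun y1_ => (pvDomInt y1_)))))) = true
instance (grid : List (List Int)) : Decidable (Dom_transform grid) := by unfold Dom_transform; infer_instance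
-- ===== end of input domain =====

-- B re-implements the component count by one row-major scanline pass that merges component
-- sets on left/up adjacency (no sort, no DFS stack); objective: alternative algorithm, same result.

-- ===== PORT A =====
-- two list lemmas used only by dfsA's termination proof (cited in decreasing_by)
theorem pvLenFilterMono {α : Type} (p q : α → Bool) (l : List α)
    (h : ∀ x ∈ l, q x = true → p x = true) :
    (l.filter q).length ≤ (l.filter p).length := by
  induction l with
  | nil => simp
  | cons a t ih =>
    have ht : ∀ x ∈ t, q x = true → p x = true := fun x hx => h x (by simp [hx])
    by_cases hq : q a = true
    · have hp : p a = true := h a (by simp) hq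
      simp [List.filter_cons, hq, hp]; exact ih ht
    · simp only [List.filter_cons, hq, if_neg]
      simp only [Bool.not_eq_true] at hq
      simp [hq]
      exact Nat.le_trans (ih ht) (by by_cases hp : p a = true <;> simp [hp])

theorem pvLenFilterLt {α : Type} (p q : α → Bool) (l : List α) (x : α)
    (h : ∀ y ∈ l, q y = true → p y = true) (hx : x ∈ l)
    (hpx : p x = true) (hqx : q x = false) :
    (l.filter q).length < (l.filter p).length := by
  obtain ⟨s, t, rfl⟩ := List.append_of_mem hx
  have hs : ∀ y ∈ s, q y = true → p y = true := fun y hy => h y (by simp [hy])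
  have ht : ∀ y ∈ t, q y = true → p y = true := fun y hy => h y (by simp [hy])
  have h1 := pvLenFilterMono p q s hs
  have h2 := pvLenFilterMono p q t ht
  simp [List.filter_append, List.filter_cons, hpx, hqx]
  omega

-- DFS of A: explicit stack, global visited set (transliteration of A's while-loop)
def dfsA (mc visited : PySem.Set (Int × Int)) (stack : List (Int × Int)) :
    PySem.Set (Int × Int) :=
  match stack with
  | [] => visited
  | p :: rest =>
    if visited.contains p || !(mc.contains p) then dfsA mc visited rest
    else
      dfsA mc (visited.add p)
        ((p.1, p.2 + 1) :: (p.1, p.2 - 1) :: (p.1 + 1, p.2) :: (p.1 - 1, p.2) :: rest)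
termination_by (mc.filter (fun q => !visited.contains q)).length * 5 + stack.length
decreasing_by
  · simp only [List.length_cons]; omega
  · rename_i hcond
    simp only [Bool.or_eq_true, Bool.not_eq_true', not_or, Bool.not_eq_false] at hcond
    have hv : visited.contains p = false := by
      simpa using hcond.1
    have hpv : p ∉ visited := by simpa using hv
    have hadd : visited.add p = visited ++ [p] := by
      unfold PySem.Set.add
      simp [hpv]
    have hlt : ((mc.filter (fun q => !(visited.add p).contains q)).length)
        < (mc.filter (fun q => !visited.contains q)).length := by
      refine pvLenFilterLt _ _ mc p ?_ ?_ ?_ ?_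
      · intro y _ hy
        rw [hadd] at hy
        simp at hy ⊢
        exact hy.1
      · simpa using hcond.2
      · simpa using hv
      · rw [hadd]
        simp
    simp only [List.length_cons]
    omega

def transform (grid : List (List Int)) : List (List Int) :=
  let H : Int := PySem.List.len grid
  let W : Int := PySem.List.len (PySem.List.pyGetD grid 0 [])
  let flat : List Int := grid.flatMap (fun row => row)
  let cc : PySem.Dict Int Int := PySem.Dict.counter flat
  -- cc.most_common(1)[0][0]: CPython's heapq.nlargest(1, …) path IS max(items, key=count)
  -- (first maximal item); [0] on the empty Counter raises → excluded by Pre_, default (0,0)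
  let bg : Int := ((PySem.List.max? cc.items (fun kv => kv.2)).getD (0, 0)).1
  let non_bg : List (Int × Int) := cc.items.filter (fun kv => !(kv.1 == bg))
  if non_bg = [] then List.replicate 3 (List.replicate 3 bg)
  else
    let main_color : Int := ((PySem.List.max? non_bg (fun kv => kv.2)).getD (0, 0)).1
    let gen : List (Int × Int) := (PySem.List.pyRange 0 H 1).flatMap (fun r =>
      ((PySem.List.pyRange 0 W 1).filter (fun c =>
        PySem.List.pyGetD (PySem.List.pyGetD grid r []) c 0 == main_color)).map (fun c => (r, c)))
    let main_cells : PySem.Set (Int × Int) := PySem.Set.ofList gen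
    let cells : List (Int × Int) :=
      PySem.List.sorted2 main_cells (fun p => p.1) (fun p => p.2)
    let st := cells.foldl (fun (st : PySem.Set (Int × Int) × Nat) p =>
      if st.1.contains p then st else (dfsA main_cells st.1 [p], st.2 + 1))
      (PySem.Set.empty, 0)
    let fill_order : List (Int × Int) :=
      [(2,2),(0,2),(1,1),(2,0),(0,0),(1,2),(2,1),(0,1),(1,0)]
    (PySem.List.pyRange 0 ((min st.2 5 : Nat) : Int) 1).foldl (fun result idx =>
      let rc := PySem.List.pyGetD fill_order idx (0, 0)
      PySem.List.pySetD result rc.1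
        (PySem.List.pySetD (PySem.List.pyGetD result rc.1 []) rc.2 2))
      (List.replicate 3 (List.replicate 3 bg))

-- ===== PORT B =====
-- one scanline step of B: merge the components touched by p's left/up neighbours
def stepB (comps : List (PySem.Set (Int × Int))) (p : Int × Int) :
    List (PySem.Set (Int × Int)) :=
  let touching := comps.filter (fun comp =>
    comp.contains (p.1, p.2 - 1) || comp.contains (p.1 - 1, p.2))
  let rest := comps.filter (fun comp =>
    !comp.contains (p.1, p.2 - 1) && !comp.contains (p.1 - 1, p.2))
  let cur := touching.foldl (fun s comp => PySem.Set.union s comp) (PySem.Set.ofList [p])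
  rest ++ [cur]

def transform_alt (grid : List (List Int)) : List (List Int) :=
  let H : Int := PySem.List.len grid
  let W : Int := PySem.List.len (PySem.List.pyGetD grid 0 [])
  let counts : PySem.Dict Int Int := grid.foldl (fun d row =>
    row.foldl (fun d v => d.insert v (d.getD v 0 + 1)) d) PySem.Dict.empty
  let items := counts.items
  let st0 := (PySem.List.slice items (some 1) none).foldl
    (fun st (p : Int × Int) => if st.2 < p.2 then p else st)
    (PySem.List.pyGetD items 0 (0, 0))
  let bg : Int := st0.1
  let mt := items.foldl (fun st (p : Int × Int) =>
    if !(p.1 == bg) && st.2 < p.2 then p else st) (bg, -1)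
  if mt.2 < 0 then List.replicate 3 (List.replicate 3 bg)
  else
    let main_color : Int := mt.1
    let comps := (PySem.List.pyRange 0 H 1).foldl (fun comps r =>
      (PySem.List.pyRange 0 W 1).foldl (fun comps c =>
        if PySem.List.pyGetD (PySem.List.pyGetD grid r []) c 0 == main_color
        then stepB comps (r, c) else comps) comps) []
    let k : Nat := min comps.length 5
    let order : List (Int × Int) :=
      [(2,2),(0,2),(1,1),(2,0),(0,0),(1,2),(2,1),(0,1),(1,0)]
    let filled : PySem.Set (Int × Int) :=
      PySem.Set.ofList (PySem.List.slice order none (some (k : Int)))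
    (PySem.List.pyRange 0 3 1).map (fun r => (PySem.List.pyRange 0 3 1).map (fun c =>
      if filled.contains (r, c) then (2 : Int) else bg))

-- ===== PRECONDITION & SPEC =====
-- Pre_ excludes exactly the inputs on which A raises: the empty grid / all-empty grid
-- (IndexError on grid[0] resp. most_common(1)[0]), and grids with a row shorter than the
-- first row UNLESS the grid is uniformly one colour (then A returns before indexing it).
def Pre_transform (grid : List (List Int)) : Prop :=
  grid ≠ [] ∧ (∃ row ∈ grid, row ≠ []) ∧
    ((∀ row ∈ grid, (grid.headD []).length ≤ row.length) ∨
      (∀ x ∈ grid.flatMap (fun row => row), ∀ y ∈ grid.flatMap (fun row => row), x = y))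
instance (grid : List (List Int)) : Decidable (Pre_transform grid) := by
  unfold Pre_transform; infer_instance

def pvWitness_transform : List (List Int) := [[1, 1], [1, 2]]

def Spec_transform (grid : List (List Int)) (out : List (List Int)) : Prop :=
  out = transform_alt grid
instance (grid : List (List Int)) (out : List (List Int)) : Decidable (Spec_transform grid out) := by
  unfold Spec_transform; infer_instance

-- ===== CLAIM (what is proved, stated in full; the proofs are below) =====
def Claim_equal_transform : Prop :=
  ∀ (grid : List (List Int)), Dom_transform grid → Pre_transform grid →
    Spec_transform grid (transform grid)

-- ===== LEMMAS AND PROOFS =====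

-- 4-adjacency and connectivity inside a finite cell list S
def Adjacent (p q : Int × Int) : Prop :=
  (p.1 = q.1 ∧ (p.2 = q.2 + 1 ∨ q.2 = p.2 + 1)) ∨
  (p.2 = q.2 ∧ (p.1 = q.1 + 1 ∨ q.1 = p.1 + 1))

def Step (S : List (Int × Int)) (a b : Int × Int) : Prop :=
  a ∈ S ∧ b ∈ S ∧ Adjacent a b

def Reach (S : List (Int × Int)) : Int × Int → Int × Int → Prop :=
  Relation.ReflTransGen (Step S)

-- "n is the number of connected components of S": a transversal of size n
def IsNC (S : List (Int × Int)) (n : Nat) : Prop :=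
  ∃ reps : List (Int × Int), reps.Nodup ∧
    reps.Pairwise (fun a b => ¬ Reach S a b) ∧
    (∀ r ∈ reps, r ∈ S) ∧ (∀ x ∈ S, ∃ r ∈ reps, Reach S r x) ∧ n = reps.length

def lexLt (a b : Int × Int) : Prop := a.1 < b.1 ∨ (a.1 = b.1 ∧ a.2 < b.2)

theorem adjacent_symm : Symmetric Adjacent := by
  intro a b h; unfold Adjacent at *; omega

theorem step_symm (S : List (Int × Int)) : Symmetric (Step S) := by
  intro a b ⟨h1, h2, h3⟩; exact ⟨h2, h1, adjacent_symm h3⟩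

theorem reach_symm (S : List (Int × Int)) : Symmetric (Reach S) :=
  Relation.ReflTransGen.symmetric (step_symm S)

theorem reach_trans {S : List (Int × Int)} {a b c : Int × Int}
    (h1 : Reach S a b) (h2 : Reach S b c) : Reach S a c :=
  Relation.ReflTransGen.trans h1 h2

theorem reach_mem {S : List (Int × Int)} {a b : Int × Int} (h : Reach S a b) :
    a = b ∨ (a ∈ S ∧ b ∈ S) := by
  induction h with
  | refl => exact Or.inl rfl
  | tail _ st ih =>
    rcases ih with rfl | ⟨ha, _⟩
    · exact Or.inr ⟨st.1, st.2.1⟩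
    · exact Or.inr ⟨ha, st.2.1⟩

theorem reach_closed {S : List (Int × Int)} {C : List (Int × Int)}
    (hcl : ∀ a ∈ C, ∀ b, Step S a b → b ∈ C) {a b : Int × Int}
    (ha : a ∈ C) (h : Reach S a b) : b ∈ C := by
  induction h with
  | refl => exact ha
  | tail h st ih => exact hcl _ ih _ st

theorem notReach_symm (S : List (Int × Int)) :
    Symmetric (fun a b => ¬ Reach S a b) := by
  intro a b h hr
  exact h (reach_symm S hr)

theorem isNC_le {S : List (Int × Int)} (a b : List (Int × Int))
    (nda : a.Nodup) (pwa : a.Pairwise (fun x y => ¬ Reach S x y))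
    (haS : ∀ r ∈ a, r ∈ S) (covb : ∀ x ∈ S, ∃ r ∈ b, Reach S r x)
    (ndb : b.Nodup) : a.length ≤ b.length := by
  classical
  let F : (Int × Int) → (Int × Int) := fun r =>
    if h : ∃ r2 ∈ b, Reach S r2 r then h.choose else r
  have hmaps : ∀ r ∈ a, F r ∈ b ∧ Reach S (F r) r := by
    intro r hr
    have h : ∃ r2 ∈ b, Reach S r2 r := covb r (haS r hr)
    have hs := h.choose_spec
    simp only [F, dif_pos h]
    exact hs
  have hcard : a.toFinset.card ≤ b.toFinset.card := by
    apply Finset.card_le_card_of_injOn F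
    · intro r hr
      simp only [Finset.coe_sort_coe, List.mem_toFinset, Finset.mem_coe] at *
      exact (hmaps r hr).1
    · intro u hu v hv hF
      simp only [Finset.coe_sort_coe, List.mem_toFinset, Finset.mem_coe] at hu hv
      by_contra hne
      have h1 := hmaps u hu
      have h2 := hmaps v hv
      have hr : Reach S u v := by
        refine reach_trans (reach_symm S h1.2) ?_
        rw [hF]
        exact h2.2
      exact (pwa.forall (notReach_symm S) hu hv hne) hr
  rwa [List.toFinset_card_of_nodup nda, List.toFinset_card_of_nodup ndb] at hcard

theorem isNC_unique {S : List (Int × Int)} {n m : Nat}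
    (h1 : IsNC S n) (h2 : IsNC S m) : n = m := by
  obtain ⟨r1, nd1, pw1, hS1, cov1, rfl⟩ := h1
  obtain ⟨r2, nd2, pw2, hS2, cov2, rfl⟩ := h2
  exact le_antisymm (isNC_le r1 r2 nd1 pw1 hS1 cov2 nd2)
    (isNC_le r2 r1 nd2 pw2 hS2 cov1 nd1)

-- neighbours characterisation
theorem adjacent_iff (p b : Int × Int) :
    Adjacent p b ↔ b = (p.1, p.2 + 1) ∨ b = (p.1, p.2 - 1) ∨
      b = (p.1 + 1, p.2) ∨ b = (p.1 - 1, p.2) := by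
  obtain ⟨b1, b2⟩ := b
  simp only [Adjacent, Prod.mk.injEq]
  omega

-- ---- DFS (A side) ----

theorem dfsA_nil (mc V : PySem.Set (Int × Int)) : dfsA mc V [] = V := by
  rw [dfsA]

theorem dfsA_skip (mc V : PySem.Set (Int × Int)) (p : Int × Int) (rest : List (Int × Int))
    (h : (V.contains p || !mc.contains p) = true) :
    dfsA mc V (p :: rest) = dfsA mc V rest := by
  rw [dfsA]
  simp only [h, if_true]

theorem dfsA_visit (mc V : PySem.Set (Int × Int)) (p : Int × Int) (rest : List (Int × Int))
    (h : ¬ (V.contains p || !mc.contains p) = true) :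
    dfsA mc V (p :: rest)
    = dfsA mc (V.add p)
        ((p.1, p.2 + 1) :: (p.1, p.2 - 1) :: (p.1 + 1, p.2) :: (p.1 - 1, p.2) :: rest) := by
  rw [dfsA]
  exact if_neg h

theorem dfsA_mono (mc : PySem.Set (Int × Int)) :
    ∀ (V : PySem.Set (Int × Int)) (st : List (Int × Int)) (y : Int × Int),
      y ∈ V → y ∈ dfsA mc V st := by
  intro V st
  induction V, st using dfsA.induct mc with
  | case1 V => intro y hy; rwa [dfsA_nil]
  | case2 V p rest hcond ih =>
    intro y hy
    rw [dfsA_skip mc V p rest hcond]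
    exact ih y hy
  | case3 V p rest hcond ih =>
    intro y hy
    rw [dfsA_visit mc V p rest hcond]
    exact ih y ((PySem.Set.mem_add V p y).2 (Or.inl hy))

theorem dfsA_sub (mc : PySem.Set (Int × Int)) :
    ∀ (V : PySem.Set (Int × Int)) (st : List (Int × Int)) (y : Int × Int),
      y ∈ dfsA mc V st → y ∈ V ∨ ∃ p ∈ st, p ∈ mc ∧ Reach mc p y := by
  intro V st
  induction V, st using dfsA.induct mc with
  | case1 V => intro y hy; rw [dfsA_nil] at hy; exact Or.inl hy
  | case2 V p rest hcond ih =>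
    intro y hy
    rw [dfsA_skip mc V p rest hcond] at hy
    rcases ih y hy with h | ⟨q, hq, hqmc, hr⟩
    · exact Or.inl h
    · exact Or.inr ⟨q, List.mem_cons_of_mem _ hq, hqmc, hr⟩
  | case3 V p rest hcond ih =>
    intro y hy
    rw [dfsA_visit mc V p rest hcond] at hy
    simp only [Bool.or_eq_true, not_or, Bool.not_eq_true', Bool.not_eq_false] at hcond
    have hpmc : p ∈ mc := by
      have := hcond.2
      simpa using this
    rcases ih y hy with h | ⟨q, hq, hqmc, hr⟩
    · rcases (PySem.Set.mem_add V p y).1 h with h' | hyp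
      · exact Or.inl h'
      · exact Or.inr ⟨p, List.mem_cons_self, hpmc, by rw [hyp]; exact Relation.ReflTransGen.refl⟩
    · have hreach : (Adjacent p q) → y ∈ V ∨ ∃ p' ∈ p :: rest, p' ∈ mc ∧ Reach mc p' y := by
        intro hadj
        exact Or.inr ⟨p, List.mem_cons_self, hpmc,
          Relation.ReflTransGen.head ⟨hpmc, hqmc, hadj⟩ hr⟩
      rcases List.mem_cons.1 hq with rfl | h4
      · exact hreach ((adjacent_iff p _).2 (by simp))
      rcases List.mem_cons.1 h4 with rfl | h4
      · exact hreach ((adjacent_iff p _).2 (by simp))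
      rcases List.mem_cons.1 h4 with rfl | h4
      · exact hreach ((adjacent_iff p _).2 (by simp))
      rcases List.mem_cons.1 h4 with rfl | h4
      · exact hreach ((adjacent_iff p _).2 (by simp))
      · exact Or.inr ⟨q, List.mem_cons_of_mem _ h4, hqmc, hr⟩

theorem dfsA_stmem (mc : PySem.Set (Int × Int)) :
    ∀ (V : PySem.Set (Int × Int)) (st : List (Int × Int)) (p : Int × Int),
      p ∈ st → p ∈ mc → p ∈ dfsA mc V st := by
  intro V st
  induction V, st using dfsA.induct mc with
  | case1 V => intro p hp _; cases hp
  | case2 V p rest hcond ih =>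
    intro q hq hqmc
    rw [dfsA_skip mc V p rest hcond]
    rcases List.mem_cons.1 hq with rfl | hq'
    · -- q = p; the skip happened with p ∈ mc, so p ∈ V
      have hpV : q ∈ V := by
        have hc : q ∈ V ∨ q ∉ mc := by simpa using hcond
        rcases hc with h | h
        · exact h
        · exact absurd hqmc h
      exact dfsA_mono mc V rest q hpV
    · exact ih q hq' hqmc
  | case3 V p rest hcond ih =>
    intro q hq hqmc
    rw [dfsA_visit mc V p rest hcond]
    rcases List.mem_cons.1 hq with rfl | hq'
    · exact dfsA_mono mc _ _ q ((PySem.Set.mem_add V q q).2 (Or.inr rfl))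
    · exact ih q (by simp [hq']) hqmc

theorem dfsA_closed (mc : PySem.Set (Int × Int)) :
    ∀ (V : PySem.Set (Int × Int)) (st : List (Int × Int)),
      (∀ a b, a ∈ V → Step mc a b → b ∈ V ∨ b ∈ st) →
      ∀ a b, a ∈ dfsA mc V st → Step mc a b → b ∈ dfsA mc V st := by
  intro V st
  induction V, st using dfsA.induct mc with
  | case1 V =>
    intro hfront a b ha hst
    rw [dfsA_nil] at ha ⊢
    rcases hfront a b ha hst with h | h
    · exact h
    · cases h
  | case2 V p rest hcond ih =>
    intro hfront a b ha hst
    rw [dfsA_skip mc V p rest hcond] at ha ⊢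
    refine ih ?_ a b ha hst
    intro a' b' ha' hst'
    rcases hfront a' b' ha' hst' with h | h
    · exact Or.inl h
    · rcases List.mem_cons.1 h with rfl | h'
      · -- b' = p ∈ mc forces p ∈ V in the skip case
        left
        have hc : b' ∈ V ∨ b' ∉ mc := by simpa using hcond
        rcases hc with hc | hc
        · exact hc
        · exact absurd hst'.2.1 hc
      · exact Or.inr h'
  | case3 V p rest hcond ih =>
    intro hfront a b ha hst
    rw [dfsA_visit mc V p rest hcond] at ha ⊢
    refine ih ?_ a b ha hst
    intro a' b' ha' hst'
    rcases (PySem.Set.mem_add V p a').1 ha' with ha'' | hEq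
    · rcases hfront a' b' ha'' hst' with h | h
      · exact Or.inl ((PySem.Set.mem_add V p b').2 (Or.inl h))
      · rcases List.mem_cons.1 h with hbp | h'
        · exact Or.inl ((PySem.Set.mem_add V p b').2 (Or.inr hbp))
        · exact Or.inr (by simp [h'])
    · -- a' = p: every mc-neighbour of p is on the new stack
      subst hEq
      right
      rcases (adjacent_iff a' b').1 hst'.2.2 with rfl | rfl | rfl | rfl <;> simp

theorem dfsA_spec (mc V : PySem.Set (Int × Int)) (s : Int × Int)
    (hV : ∀ a b, a ∈ V → Step mc a b → b ∈ V) (hs : s ∈ mc) :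
    ∀ y, y ∈ dfsA mc V [s] ↔ y ∈ V ∨ Reach mc s y := by
  intro y
  constructor
  · intro hy
    rcases dfsA_sub mc V [s] y hy with h | ⟨p, hp, _, hr⟩
    · exact Or.inl h
    · simp only [List.mem_singleton] at hp
      subst hp
      exact Or.inr hr
  · intro h
    rcases h with h | hr
    · exact dfsA_mono mc V [s] y h
    · induction hr with
      | refl => exact dfsA_stmem mc V [s] s (by simp) hs
      | tail h st ih =>
        exact dfsA_closed mc V [s] (fun a b ha hst => Or.inl (hV a b ha hst)) _ _ ih st

-- ---- A's outer loop invariant ----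
def AInv (S P : List (Int × Int)) (st : PySem.Set (Int × Int) × Nat) : Prop :=
  (∀ y, y ∈ st.1 ↔ ∃ p ∈ P, Reach S p y) ∧
  ∃ reps : List (Int × Int), reps.Nodup ∧
    reps.Pairwise (fun a b => ¬ Reach S a b) ∧
    (∀ r ∈ reps, r ∈ P) ∧ (∀ p ∈ P, ∃ r ∈ reps, Reach S r p) ∧ st.2 = reps.length

theorem A_fold (S : List (Int × Int)) :
    ∀ (cells P : List (Int × Int)) (st : PySem.Set (Int × Int) × Nat),
      (∀ p ∈ P, p ∈ S) → (∀ p ∈ cells, p ∈ S) → cells.Nodup →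
      (∀ x ∈ cells, x ∉ P) → AInv S P st →
      AInv S (P ++ cells)
        (cells.foldl (fun st p =>
          if st.1.contains p then st else (dfsA S st.1 [p], st.2 + 1)) st) := by
  intro cells
  induction cells with
  | nil => intro P st _ _ _ _ h; simpa using h
  | cons x rest ih =>
    intro P st hP hc hnd hdis hinv
    obtain ⟨hV, reps, hrnd, hrpw, hrP, hcov, hN⟩ := hinv
    have hxS : x ∈ S := hc x List.mem_cons_self
    have hxP : x ∉ P := hdis x List.mem_cons_self
    have hst1S : ∀ y ∈ st.1, y ∈ S := by
      intro y hy
      rcases (hV y).1 hy with ⟨p, hp, hr⟩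
      rcases reach_mem hr with rfl | ⟨_, h2⟩
      · exact hP _ hp
      · exact h2
    have hclosed : ∀ a b, a ∈ st.1 → Step S a b → b ∈ st.1 := by
      intro a b ha hs
      rcases (hV a).1 ha with ⟨p, hp, hr⟩
      exact (hV b).2 ⟨p, hp, Relation.ReflTransGen.tail hr hs⟩
    have hstep : ∀ st' : PySem.Set (Int × Int) × Nat,
        st' = (if st.1.contains x then st else (dfsA S st.1 [x], st.2 + 1)) →
        AInv S (P ++ [x]) st' := by
      intro st' hst'
      by_cases hx : st.1.contains x = true
      · rw [hst', if_pos hx]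
        have hxV : x ∈ st.1 := (PySem.Set.contains_iff st.1 x).1 hx
        obtain ⟨p0, hp0, hr0⟩ := (hV x).1 hxV
        refine ⟨?_, reps, hrnd, hrpw, ?_, ?_, hN⟩
        · intro y
          constructor
          · intro hy
            rcases (hV y).1 hy with ⟨p, hp, hr⟩
            exact ⟨p, List.mem_append_left _ hp, hr⟩
          · rintro ⟨p, hp, hr⟩
            rcases List.mem_append.1 hp with hp' | hp'
            · exact (hV y).2 ⟨p, hp', hr⟩
            · simp only [List.mem_singleton] at hp'
              subst hp'
              exact (hV y).2 ⟨p0, hp0, reach_trans hr0 hr⟩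
        · exact fun r hr => List.mem_append_left _ (hrP r hr)
        · intro p hp
          rcases List.mem_append.1 hp with hp' | hp'
          · exact hcov p hp'
          · simp only [List.mem_singleton] at hp'
            subst hp'
            obtain ⟨r, hr, hrr⟩ := hcov p0 hp0
            exact ⟨r, hr, reach_trans hrr hr0⟩
      · rw [hst', if_neg hx]
        have hxV : x ∉ st.1 := fun h => hx ((PySem.Set.contains_iff st.1 x).2 h)
        have hdfs := dfsA_spec S st.1 x hclosed hxS
        have hxreps : x ∉ reps := fun h => hxP (hrP x h)
        refine ⟨?_, reps ++ [x], ?_, ?_, ?_, ?_, ?_⟩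
        · intro y
          rw [hdfs y]
          constructor
          · rintro (hy | hy)
            · rcases (hV y).1 hy with ⟨p, hp, hr⟩
              exact ⟨p, List.mem_append_left _ hp, hr⟩
            · exact ⟨x, List.mem_append_right _ (by simp), hy⟩
          · rintro ⟨p, hp, hr⟩
            rcases List.mem_append.1 hp with hp' | hp'
            · exact Or.inl ((hV y).2 ⟨p, hp', hr⟩)
            · simp only [List.mem_singleton] at hp'
              subst hp'
              exact Or.inr hr
        · exact List.Nodup.append hrnd (List.nodup_singleton x) (by simpa using hxreps)
        · rw [List.pairwise_append]
          refine ⟨hrpw, by simp, ?_⟩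
          intro a ha b hb
          simp only [List.mem_singleton] at hb
          intro hr
          exact hxV ((hV x).2 ⟨a, hrP a ha, hb ▸ hr⟩)
        · intro r hr
          rcases List.mem_append.1 hr with h | h
          · exact List.mem_append_left _ (hrP r h)
          · exact List.mem_append_right _ h
        · intro p hp
          rcases List.mem_append.1 hp with h | h
          · obtain ⟨r, hr, hrr⟩ := hcov p h
            exact ⟨r, List.mem_append_left _ hr, hrr⟩
          · simp only [List.mem_singleton] at h
            subst h
            exact ⟨p, List.mem_append_right _ (by simp), Relation.ReflTransGen.refl⟩
        · simp [hN]
    simp only [List.foldl]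
    rw [show P ++ x :: rest = (P ++ [x]) ++ rest by simp]
    apply ih (P ++ [x])
    · intro p hp
      rcases List.mem_append.1 hp with h | h
      · exact hP p h
      · simp only [List.mem_singleton] at h; subst h; exact hxS
    · exact fun p hp => hc p (List.mem_cons_of_mem _ hp)
    · exact (List.nodup_cons.1 hnd).2
    · intro z hz
      intro hmem
      rcases List.mem_append.1 hmem with h | h
      · exact hdis z (List.mem_cons_of_mem _ hz) h
      · simp only [List.mem_singleton] at h
        subst h
        exact (List.nodup_cons.1 hnd).1 hz
    · exact hstep _ rfl

-- ---- B's scanline invariant ----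
def BInv (P : List (Int × Int)) (comps : List (List (Int × Int))) : Prop :=
  (∀ C ∈ comps, C ≠ []) ∧
  (∀ C ∈ comps, ∀ a ∈ C, a ∈ P) ∧
  (∀ p ∈ P, ∃ C ∈ comps, p ∈ C) ∧
  comps.Pairwise (fun C D => ∀ a ∈ C, a ∉ D) ∧
  (∀ C ∈ comps, ∀ a ∈ C, ∀ b ∈ C, Reach P a b) ∧
  (∀ C ∈ comps, ∀ a ∈ C, ∀ b, Step P a b → b ∈ C)

theorem mem_foldl_union (l : List (PySem.Set (Int × Int))) :
    ∀ (s : PySem.Set (Int × Int)) (y : Int × Int),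
      y ∈ l.foldl (fun s c => PySem.Set.union s c) s ↔ y ∈ s ∨ ∃ C ∈ l, y ∈ C := by
  induction l with
  | nil => intro s y; simp
  | cons a t ih =>
    intro s y
    simp only [List.foldl]
    rw [ih, PySem.Set.mem_union]
    simp only [List.mem_cons]
    constructor
    · rintro ((h | h) | ⟨C, hC, hy⟩)
      · exact Or.inl h
      · exact Or.inr ⟨a, Or.inl rfl, h⟩
      · exact Or.inr ⟨C, Or.inr hC, hy⟩
    · rintro (h | ⟨C, (rfl | hC), hy⟩)
      · exact Or.inl (Or.inl h)
      · exact Or.inl (Or.inr hy)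
      · exact Or.inr ⟨C, hC, hy⟩

theorem stepB_eq (comps : List (PySem.Set (Int × Int))) (p : Int × Int) :
    stepB comps p
    = comps.filter (fun comp =>
        !comp.contains (p.1, p.2 - 1) && !comp.contains (p.1 - 1, p.2)) ++
      [(comps.filter (fun comp =>
          comp.contains (p.1, p.2 - 1) || comp.contains (p.1 - 1, p.2))).foldl
        (fun s comp => PySem.Set.union s comp) (PySem.Set.ofList [p])] := rfl

theorem reach_append {P : List (Int × Int)} {x a b : Int × Int}
    (h : Reach P a b) : Reach (P ++ [x]) a b := by
  refine Relation.ReflTransGen.mono ?_ h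
  rintro u v ⟨h1, h2, h3⟩
  exact ⟨List.mem_append_left _ h1, List.mem_append_left _ h2, h3⟩

theorem disjoint_symm_aux :
    Symmetric (fun C D : List (Int × Int) => ∀ a ∈ C, a ∉ D) := by
  intro C D h a haD haC
  exact h a haC haD

theorem B_step_core (P : List (Int × Int)) (comps : List (List (Int × Int))) (x : Int × Int)
    (tch rst : List (List (Int × Int))) (cur : List (Int × Int))
    (hnew : x ∉ P)
    (hnbr : ∀ y ∈ P, Adjacent x y → y = (x.1, x.2 - 1) ∨ y = (x.1 - 1, x.2))
    (h : BInv P comps)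
    (htch_mem : ∀ C, C ∈ tch ↔ C ∈ comps ∧ ((x.1, x.2 - 1) ∈ C ∨ (x.1 - 1, x.2) ∈ C))
    (hrst_mem : ∀ C, C ∈ rst ↔ C ∈ comps ∧ ¬((x.1, x.2 - 1) ∈ C ∨ (x.1 - 1, x.2) ∈ C))
    (hrstPW : rst.Pairwise (fun C D => ∀ a ∈ C, a ∉ D))
    (hcur_mem : ∀ y, y ∈ cur ↔ y = x ∨ ∃ C ∈ tch, y ∈ C) :
    BInv (P ++ [x]) (rst ++ [cur]) := by
  obtain ⟨h1, h2, h3, h4, h5, h6⟩ := h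
  have hdisj2 : ∀ C D, C ∈ comps → D ∈ comps → ∀ a, a ∈ C → a ∈ D → C = D := by
    intro C D hC hD a haC haD
    by_contra hne
    exact (h4.forall disjoint_symm_aux hC hD hne) a haC haD
  have hxcur : x ∈ cur := (hcur_mem x).2 (Or.inl rfl)
  have hadjL : Adjacent x (x.1, x.2 - 1) := (adjacent_iff x _).2 (by simp)
  have hadjU : Adjacent x (x.1 - 1, x.2) := (adjacent_iff x _).2 (by simp)
  have hcurP : ∀ a ∈ cur, a = x ∨ a ∈ P := by
    intro a ha
    rcases (hcur_mem a).1 ha with rfl | ⟨C, hC, haC⟩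
    · exact Or.inl rfl
    · exact Or.inr (h2 C ((htch_mem C).1 hC).1 a haC)
  have hcurx : ∀ a ∈ cur, Reach (P ++ [x]) a x := by
    intro a ha
    rcases (hcur_mem a).1 ha with rfl | ⟨C, hC, haC⟩
    · exact Relation.ReflTransGen.refl
    · obtain ⟨hCc, hw⟩ := (htch_mem C).1 hC
      rcases hw with hw | hw
      · refine Relation.ReflTransGen.tail (reach_append (h5 C hCc a haC _ hw)) ?_
        exact ⟨List.mem_append_left _ (h2 C hCc _ hw),
          List.mem_append_right _ (by simp), adjacent_symm hadjL⟩
      · refine Relation.ReflTransGen.tail (reach_append (h5 C hCc a haC _ hw)) ?_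
        exact ⟨List.mem_append_left _ (h2 C hCc _ hw),
          List.mem_append_right _ (by simp), adjacent_symm hadjU⟩
  refine ⟨?_, ?_, ?_, ?_, ?_, ?_⟩
  · -- (1) nonempty
    intro C hC
    rcases List.mem_append.1 hC with hC | hC
    · exact h1 C ((hrst_mem C).1 hC).1
    · simp only [List.mem_singleton] at hC
      subst hC
      exact List.ne_nil_of_mem hxcur
  · -- (2) contained in P ++ [x]
    intro C hC a haC
    rcases List.mem_append.1 hC with hC | hC
    · exact List.mem_append_left _ (h2 C ((hrst_mem C).1 hC).1 a haC)
    · simp only [List.mem_singleton] at hC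
      subst hC
      rcases hcurP a haC with rfl | hP
      · exact List.mem_append_right _ (by simp)
      · exact List.mem_append_left _ hP
  · -- (3) cover
    intro p hp
    rcases List.mem_append.1 hp with hp | hp
    · obtain ⟨C0, hC0, hpC0⟩ := h3 p hp
      by_cases ht : (x.1, x.2 - 1) ∈ C0 ∨ (x.1 - 1, x.2) ∈ C0
      · exact ⟨cur, List.mem_append_right _ (by simp),
          (hcur_mem p).2 (Or.inr ⟨C0, (htch_mem C0).2 ⟨hC0, ht⟩, hpC0⟩)⟩
      · exact ⟨C0, List.mem_append_left _ ((hrst_mem C0).2 ⟨hC0, ht⟩), hpC0⟩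
    · simp only [List.mem_singleton] at hp
      subst hp
      exact ⟨cur, List.mem_append_right _ (by simp), hxcur⟩
  · -- (4) pairwise disjoint
    rw [List.pairwise_append]
    refine ⟨hrstPW, by simp, ?_⟩
    intro D hD c hc
    simp only [List.mem_singleton] at hc
    subst hc
    intro a haD hacur
    rcases (hcur_mem a).1 hacur with rfl | ⟨C, hC, haC⟩
    · exact hnew (h2 D ((hrst_mem D).1 hD).1 a haD)
    · have hCD : C = D :=
        hdisj2 C D ((htch_mem C).1 hC).1 ((hrst_mem D).1 hD).1 a haC haD
      subst hCD
      exact ((hrst_mem C).1 hD).2 ((htch_mem C).1 hC).2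
  · -- (5) connected inside P ++ [x]
    intro C hC a haC b hbC
    rcases List.mem_append.1 hC with hC | hC
    · exact reach_append (h5 C ((hrst_mem C).1 hC).1 a haC b hbC)
    · simp only [List.mem_singleton] at hC
      subst hC
      exact reach_trans (hcurx a haC) (reach_symm _ (hcurx b hbC))
  · -- (6) closed under Step (P ++ [x])
    intro C hC a haC b hstep
    obtain ⟨haM, hbM, hadj⟩ := hstep
    rcases List.mem_append.1 hC with hC | hC
    · -- C untouched
      have haP : a ∈ P := h2 C ((hrst_mem C).1 hC).1 a haC
      rcases List.mem_append.1 hbM with hbP | hbx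
      · exact h6 C ((hrst_mem C).1 hC).1 a haC b ⟨haP, hbP, hadj⟩
      · simp only [List.mem_singleton] at hbx
        subst hbx
        exfalso
        rcases hnbr a haP (adjacent_symm hadj) with ha' | ha'
        · exact ((hrst_mem C).1 hC).2 (Or.inl (ha' ▸ haC))
        · exact ((hrst_mem C).1 hC).2 (Or.inr (ha' ▸ haC))
    · simp only [List.mem_singleton] at hC
      subst hC
      rcases List.mem_append.1 hbM with hbP | hbx
      · rcases (hcur_mem a).1 haC with rfl | ⟨C0, hC0, haC0⟩
        · -- a = x: its P-neighbour is L or U, hence in a touching component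
          obtain ⟨D, hD, hbD⟩ := h3 b hbP
          rcases hnbr b hbP hadj with hb' | hb'
          · exact (hcur_mem b).2
              (Or.inr ⟨D, (htch_mem D).2 ⟨hD, Or.inl (hb' ▸ hbD)⟩, hbD⟩)
          · exact (hcur_mem b).2
              (Or.inr ⟨D, (htch_mem D).2 ⟨hD, Or.inr (hb' ▸ hbD)⟩, hbD⟩)
        · have hC0c := ((htch_mem C0).1 hC0).1
          have haP : a ∈ P := h2 C0 hC0c a haC0
          have hbC0 : b ∈ C0 := h6 C0 hC0c a haC0 b ⟨haP, hbP, hadj⟩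
          exact (hcur_mem b).2 (Or.inr ⟨C0, hC0, hbC0⟩)
      · simp only [List.mem_singleton] at hbx
        subst hbx
        exact hxcur

theorem B_step (P : List (Int × Int)) (comps : List (List (Int × Int))) (x : Int × Int)
    (hnew : x ∉ P)
    (hnbr : ∀ y ∈ P, Adjacent x y → y = (x.1, x.2 - 1) ∨ y = (x.1 - 1, x.2))
    (h : BInv P comps) : BInv (P ++ [x]) (stepB comps x) := by
  rw [stepB_eq]
  refine B_step_core P comps x
    (comps.filter (fun comp =>
      comp.contains (x.1, x.2 - 1) || comp.contains (x.1 - 1, x.2)))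
    _ _ hnew hnbr h ?_ ?_ ?_ ?_
  · intro C
    simp [List.mem_filter, PySem.Set.contains_iff]
  · intro C
    simp only [List.mem_filter, Bool.and_eq_true, Bool.not_eq_true',
      ← Bool.not_eq_true, PySem.Set.contains_iff]
    tauto
  · exact h.2.2.2.1.filter _
  · intro y
    rw [mem_foldl_union]
    simp
theorem lexLt_irrefl (a : Int × Int) : ¬ lexLt a a := by
  simp [lexLt]

theorem nbr_of_lexLt (x y : Int × Int) (hl : lexLt y x) (ha : Adjacent x y) :
    y = (x.1, x.2 - 1) ∨ y = (x.1 - 1, x.2) := by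
  rcases (adjacent_iff x y).1 ha with rfl | rfl | rfl | rfl
  · exfalso; simp only [lexLt] at hl; omega
  · exact Or.inl rfl
  · exfalso; simp only [lexLt] at hl; omega
  · exact Or.inr rfl

theorem B_fold :
    ∀ (cells P : List (Int × Int)) (comps : List (List (Int × Int))),
      (P ++ cells).Pairwise lexLt → BInv P comps →
      BInv (P ++ cells) (cells.foldl stepB comps) := by
  intro cells
  induction cells with
  | nil => intro P comps _ h; simpa using h
  | cons x rest ih =>
    intro P comps hpw hinv
    have hcross : ∀ y ∈ P, lexLt y x :=
      fun y hy => (List.pairwise_append.1 hpw).2.2 y hy x List.mem_cons_self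
    have hxP : x ∉ P := fun hx => lexLt_irrefl x (hcross x hx)
    have hnbr : ∀ y ∈ P, Adjacent x y → y = (x.1, x.2 - 1) ∨ y = (x.1 - 1, x.2) :=
      fun y hy ha => nbr_of_lexLt x y (hcross y hy) ha
    simp only [List.foldl]
    rw [show P ++ x :: rest = (P ++ [x]) ++ rest by simp]
    apply ih (P ++ [x])
    · rwa [show (P ++ [x]) ++ rest = P ++ x :: rest by simp]
    · exact B_step P comps x hxP hnbr hinv

theorem B_isNC (P : List (Int × Int)) (comps : List (List (Int × Int)))
    (h : BInv P comps) : IsNC P comps.length := by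
  obtain ⟨h1, h2, h3, h4, h5, h6⟩ := h
  have hhd : ∀ C ∈ comps, C.headD (0, 0) ∈ C := by
    intro C hC
    cases C with
    | nil => exact absurd rfl (h1 [] hC)
    | cons a t => simp
  refine ⟨comps.map (fun C => C.headD (0, 0)), ?_, ?_, ?_, ?_, by simp⟩
  · unfold List.Nodup
    rw [List.pairwise_map]
    refine h4.imp_of_mem ?_
    intro C D hC hD hdisj heq
    exact hdisj _ (hhd C hC) (heq ▸ hhd D hD)
  · rw [List.pairwise_map]
    refine h4.imp_of_mem ?_
    intro C D hC hD hdisj hr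
    have hDC : D.headD (0, 0) ∈ C := reach_closed (h6 C hC) (hhd C hC) hr
    exact hdisj _ hDC (hhd D hD)
  · intro r hr
    obtain ⟨C, hC, rfl⟩ := List.mem_map.1 hr
    exact h2 C hC _ (hhd C hC)
  · intro p hp
    obtain ⟨C, hC, hpC⟩ := h3 p hp
    exact ⟨C.headD (0, 0), List.mem_map_of_mem hC, h5 C hC _ (hhd C hC) p hpC⟩

-- ---- the central count equality ----
theorem lexLt_ne {a b : Int × Int} (h : lexLt a b) : a ≠ b := by
  intro heq
  subst heq
  exact lexLt_irrefl a h

theorem count_eq (S : List (Int × Int)) (hpw : S.Pairwise lexLt) :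
    (S.foldl (fun st p =>
        if st.1.contains p then st else (dfsA S st.1 [p], st.2 + 1))
      (PySem.Set.empty, 0)).2
    = (S.foldl stepB []).length := by
  have hnd : S.Nodup := hpw.imp lexLt_ne
  have hA0 : AInv S [] (PySem.Set.empty, 0) := by
    refine ⟨?_, [], by simp, by simp, by simp, by simp, rfl⟩
    intro y
    simp [PySem.Set.empty]
  have hA := A_fold S S [] (PySem.Set.empty, 0) (by simp) (fun p h => h) hnd
    (by simp) hA0
  have hB := B_fold S [] [] (by simpa using hpw)
    ⟨by simp, by simp, by simp, by simp, by simp, by simp⟩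
  simp only [List.nil_append] at hA hB
  obtain ⟨hV, reps, hrnd, hrpw, hrP, hcov, hN⟩ := hA
  exact isNC_unique ⟨reps, hrnd, hrpw, hrP, hcov, hN⟩ (B_isNC S _ hB)

-- ---- selection (bg / main colour) lemmas ----
theorem max?_cons : ∀ (l : List (Int × Int)) (m : Int × Int),
    PySem.List.max? (m :: l) (fun kv => kv.2)
    = some (l.foldl (fun st p => if st.2 < p.2 then p else st) m)
  | [], m => rfl
  | a :: t, m => by
    have h1 : PySem.List.max? (m :: a :: t) (fun kv => kv.2)
        = PySem.List.max? ((if m.2 < a.2 then a else m) :: t) (fun kv => kv.2) := by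
      simp only [PySem.List.max?, List.foldl]
      by_cases h : m.2 < a.2 <;> simp [h]
    rw [h1, max?_cons t _]
    simp only [List.foldl]

theorem foldl_pick_snd_le (l : List (Int × Int)) (m : Int × Int) :
    m.2 ≤ (l.foldl (fun st p => if st.2 < p.2 then p else st) m).2 := by
  induction l generalizing m with
  | nil => simp
  | cons a t ih =>
    simp only [List.foldl]
    by_cases h : m.2 < a.2
    · simp only [h, if_pos]; exact le_trans (le_of_lt h) (ih a)
    · simp only [h, if_neg]; exact ih m

-- ---- the final 3×3 pattern: A's fill loop = B's membership comprehension ----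
set_option maxHeartbeats 4000000 in
theorem pattern_eq (bg : Int) (k : Nat) (hk : k ≤ 5) :
    (PySem.List.pyRange 0 (k : Int) 1).foldl (fun result idx =>
      let rc := PySem.List.pyGetD
        [((2:Int),(2:Int)),(0,2),(1,1),(2,0),(0,0),(1,2),(2,1),(0,1),(1,0)] idx (0, 0)
      PySem.List.pySetD result rc.1
        (PySem.List.pySetD (PySem.List.pyGetD result rc.1 []) rc.2 2))
      (List.replicate 3 (List.replicate 3 bg))
    = (PySem.List.pyRange 0 3 1).map (fun r => (PySem.List.pyRange 0 3 1).map (fun c =>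
        if (PySem.Set.ofList (PySem.List.slice
            [((2:Int),(2:Int)),(0,2),(1,1),(2,0),(0,0),(1,2),(2,1),(0,1),(1,0)]
            none (some (k : Int)))).contains (r, c) then (2 : Int) else bg)) := by
  interval_cases k <;> rfl

theorem bg_eq (items : List (Int × Int)) :
    ((PySem.List.max? items (fun kv => kv.2)).getD (0, 0)).1
    = ((PySem.List.slice items (some 1) none).foldl
        (fun st (p : Int × Int) => if st.2 < p.2 then p else st)
        (PySem.List.pyGetD items 0 (0, 0))).1 := by
  cases items with
  | nil => rfl
  | cons i0 t =>
    rw [max?_cons, PySem.List.slice_from_one, PySem.List.pyGetD_zero_cons]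
    rfl

theorem foldl_cond_filter (items : List (Int × Int)) (bg : Int) (init : Int × Int) :
    items.foldl (fun st (p : Int × Int) =>
      if !(p.1 == bg) && st.2 < p.2 then p else st) init
    = (items.filter (fun kv => !(kv.1 == bg))).foldl
        (fun st p => if st.2 < p.2 then p else st) init := by
  rw [List.foldl_filter]
  congr 1
  funext st p
  by_cases h1 : (p.1 == bg) <;> by_cases h2 : st.2 < p.2 <;> simp [h1, h2]

theorem items_pos (flat : List Int) :
    ∀ p ∈ (PySem.Dict.counter flat).items, 0 < p.2 := by
  intro p hp
  rw [PySem.Dict.items_counter] at hp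
  obtain ⟨k, hk, rfl⟩ := List.mem_map.1 hp
  have hmem : k ∈ flat := (PySem.Set.mem_ofList flat k).1 hk
  show (0 : Int) < (List.count k flat : Int)
  exact_mod_cast List.count_pos_iff.2 hmem

theorem counts_eq (grid : List (List Int)) :
    grid.foldl (fun d row =>
      row.foldl (fun d v => d.insert v (d.getD v 0 + 1)) d) PySem.Dict.empty
    = PySem.Dict.counter (grid.flatMap (fun row => row)) := by
  rw [← PySem.Dict.foldl_insert_getD_add_one_eq_counter, List.foldl_flatMap]

theorem foldl_insertBy_eq_self (before : (Int × Int) → (Int × Int) → Bool) :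
    ∀ xs : List (Int × Int), xs.Pairwise (fun a b => before b a = false) →
      xs.foldl (fun acc x => PySem.List.insertBy before x acc) [] = xs := by
  intro xs
  induction xs using List.reverseRecOn with
  | nil => intro _; rfl
  | append_singleton ys x ih =>
    intro h
    rw [List.foldl_append]
    simp only [List.foldl]
    rw [ih ((List.pairwise_append.1 h).1)]
    exact PySem.List.insertBy_of_forall_not_before before x ys
      (fun y hy => (List.pairwise_append.1 h).2.2 y hy x (by simp))

theorem lexLt_before_false {a b : Int × Int} (h : lexLt a b) :
    (decide (b.1 < a.1) || (!decide (a.1 < b.1) && decide (b.2 < a.2))) = false := by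
  simp only [lexLt] at h
  simp only [Bool.or_eq_false_iff, Bool.and_eq_false_iff, Bool.not_eq_false',
    decide_eq_false_iff_not, decide_eq_true_eq]
  omega

theorem sorted2_eq_self (xs : List (Int × Int)) (h : xs.Pairwise lexLt) :
    PySem.List.sorted2 xs (fun p => p.1) (fun p => p.2) = xs := by
  simp only [PySem.List.sorted2]
  simp only [if_neg (by simp : ¬ (false = true))]
  exact foldl_insertBy_eq_self _ xs (h.imp lexLt_before_false)

theorem gen_pairwise (H W : Int) (f : Int → Int → Bool) :
    ((PySem.List.pyRange 0 H 1).flatMap (fun r =>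
      ((PySem.List.pyRange 0 W 1).filter (fun c => f r c)).map
        (fun c => ((r, c) : Int × Int)))).Pairwise lexLt := by
  rw [List.pairwise_flatMap]
  constructor
  · intro r _
    rw [List.pairwise_map]
    refine ((PySem.List.pairwise_lt_pyRange_one 0 W).filter _).imp ?_
    intro a b hab
    exact Or.inr ⟨rfl, hab⟩
  · refine (PySem.List.pairwise_lt_pyRange_one 0 H).imp ?_
    intro r1 r2 h12 x hx y hy
    obtain ⟨c1, _, rfl⟩ := List.mem_map.1 hx
    obtain ⟨c2, _, rfl⟩ := List.mem_map.1 hy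
    exact Or.inl h12

theorem B_comps_eq (grid : List (List Int)) (m H W : Int) :
    (PySem.List.pyRange 0 H 1).foldl (fun comps r =>
      (PySem.List.pyRange 0 W 1).foldl (fun comps c =>
        if PySem.List.pyGetD (PySem.List.pyGetD grid r []) c 0 == m
        then stepB comps (r, c) else comps) comps) []
    = ((PySem.List.pyRange 0 H 1).flatMap (fun r =>
        ((PySem.List.pyRange 0 W 1).filter (fun c =>
          PySem.List.pyGetD (PySem.List.pyGetD grid r []) c 0 == m)).map
          (fun c => ((r, c) : Int × Int)))).foldl stepB [] := by
  rw [List.foldl_flatMap]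
  have hfun : ∀ (comps : List (PySem.Set (Int × Int))) (r : Int),
      (PySem.List.pyRange 0 W 1).foldl (fun comps c =>
        if PySem.List.pyGetD (PySem.List.pyGetD grid r []) c 0 == m
        then stepB comps (r, c) else comps) comps
      = ((( PySem.List.pyRange 0 W 1).filter (fun c =>
          PySem.List.pyGetD (PySem.List.pyGetD grid r []) c 0 == m)).map
          (fun c => ((r, c) : Int × Int))).foldl stepB comps := by
    intro comps r
    rw [List.foldl_map, List.foldl_filter]
  simp only [hfun]

theorem transform_eq_alt (grid : List (List Int)) :
    transform grid = transform_alt grid := by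
  simp only [transform, transform_alt]
  rw [counts_eq grid]
  rw [← bg_eq ((PySem.Dict.counter (grid.flatMap (fun row => row))).items)]
  set items := (PySem.Dict.counter (grid.flatMap (fun row => row))).items with hitems
  have hpos : ∀ p ∈ items, 0 < p.2 := items_pos _
  set bg := ((PySem.List.max? items (fun kv => kv.2)).getD (0, 0)).1 with hbg
  rw [foldl_cond_filter items bg (bg, -1)]
  by_cases hnbe : items.filter (fun kv => !(kv.1 == bg)) = []
  · rw [if_pos hnbe, hnbe]
    rw [if_pos (by norm_num)]
  · rw [if_neg hnbe]
    obtain ⟨q0, t, hcons⟩ := List.exists_cons_of_ne_nil hnbe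
    have hq0i : q0 ∈ items := by
      have : q0 ∈ items.filter (fun kv => !(kv.1 == bg)) := by
        rw [hcons]; exact List.mem_cons_self
      exact (List.mem_filter.1 this).1
    have hq0 : 0 < q0.2 := hpos q0 hq0i
    have hfold : (items.filter (fun kv => !(kv.1 == bg))).foldl
        (fun st (p : Int × Int) => if st.2 < p.2 then p else st) (bg, -1)
        = t.foldl (fun st (p : Int × Int) => if st.2 < p.2 then p else st) q0 := by
      rw [hcons]
      simp only [List.foldl]
      rw [if_pos (by omega : ((bg, (-1 : Int)) : Int × Int).2 < q0.2)]
    rw [hfold]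
    have hmt2 : 0 < (t.foldl
        (fun st (p : Int × Int) => if st.2 < p.2 then p else st) q0).2 :=
      lt_of_lt_of_le hq0 (foldl_pick_snd_le t q0)
    rw [if_neg (by omega)]
    have hmax : PySem.List.max? (items.filter (fun kv => !(kv.1 == bg)))
        (fun kv => kv.2) = some (t.foldl
          (fun st (p : Int × Int) => if st.2 < p.2 then p else st) q0) := by
      rw [hcons, max?_cons]
    rw [hmax]
    simp only [Option.getD_some]
    set m := (t.foldl (fun st (p : Int × Int) => if st.2 < p.2 then p else st) q0).1 with hm
    set H := PySem.List.len grid with hH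
    set W := PySem.List.len (PySem.List.pyGetD grid 0 []) with hW
    have hpw := gen_pairwise H W
      (fun r c => PySem.List.pyGetD (PySem.List.pyGetD grid r []) c 0 == m)
    have hnd := hpw.imp lexLt_ne
    rw [PySem.Set.ofList_eq_self_of_nodup _ hnd, sorted2_eq_self _ hpw,
      B_comps_eq grid m H W, count_eq _ hpw]
    exact pattern_eq bg _ (min_le_right _ _)

-- ===== VERDICT (by name: the statement is the Claim_ definition above) =====
theorem transform_spec : Claim_equal_transform := by
  intro grid _ _
  unfold Spec_transform
  exact transform_eq_alt grid
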